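-- pv_equiv track=rewrite | github.com/2203juan/algorithm_workshops | python/audiometria_jupyter/LP_ParcialFinalB.py | leer_resultados_audiometria
-- ===== SOURCE A (Python) =====
-- def leer_resultados_audiometria(datos_audiometria, paciente):
--     oido_izquierdo = list()
--     oido_derecho = list()
--     nivel_oido_izquierdo = list()
--     nivel_oido_derecho = list()
--     n = len(datos_audiometria)
--
--     for i in range(1,n):
--         if datos_audiometria[i][2] == "I" and int(datos_audiometria[i][0]) == paciente:
--             oido_izquierdo.append(datos_audiometria[i][3])
--
--             nivel = int(datos_audiometria[i][3])
--             if 0 < nivel <= 25: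
--                 nivel_oido_izquierdo.append("N")
--
--             elif 25 < nivel <= 40:
--                 nivel_oido_izquierdo.append("DL")
--
--             elif 40 < nivel <= 55:
--                 nivel_oido_izquierdo.append("DM")
--             elif 55 < nivel <= 70:
--                 nivel_oido_izquierdo.append("DS")
--
--
--
--         if datos_audiometria[i][2] == "D" and int(datos_audiometria[i][0]) == paciente:
--             oido_derecho.append(datos_audiometria[i][3])
--
--             nivel = int(datos_audiometria[i][3])
--             if 0 < nivel <= 25:
--                 nivel_oido_derecho.append("N")
--
--             elif 25 < nivel <= 40:
--                 nivel_oido_derecho.append("DL")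
--
--             elif 40 < nivel <= 55:
--                 nivel_oido_derecho.append("DM")
--             elif 55 < nivel <= 70:
--                 nivel_oido_derecho.append("DS")
--
--     return (oido_izquierdo, oido_derecho, nivel_oido_izquierdo, nivel_oido_derecho)
-- ===== SOURCE B (Python) =====
-- def leer_resultados_audiometria(datos_audiometria, paciente):
--     # pass 1: filter the matching rows' values per ear
--     izquierdo, derecho = [], []
--     for fila in datos_audiometria[1:]:
--         oreja = fila[2]
--         if (oreja == "I" or oreja == "D") and int(fila[0]) == paciente:
--             (izquierdo if oreja == "I" else derecho).append(fila[3])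
--     # pass 2: classify the collected values
--     def clasificar(valores):
--         niveles = []
--         for v in valores:
--             n = int(v)
--             if 0 < n <= 70:
--                 niveles.append("N" if n <= 25 else "DL" if n <= 40 else "DM" if n <= 55 else "DS")
--         return niveles
--     return (izquierdo, derecho, clasificar(izquierdo), clasificar(derecho))
-- ===== Notes on version B (the rewrite author's own statement) =====
-- stated objective: simpler
-- what changed: Replaces the single interleaved index loop that appends-and-classifies per ear with two separate passes: one filter pass over the row slice collecting each ear's values, then a standalone classification pass (shared by both ears) mapping values to labels.
import Mathlib
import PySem

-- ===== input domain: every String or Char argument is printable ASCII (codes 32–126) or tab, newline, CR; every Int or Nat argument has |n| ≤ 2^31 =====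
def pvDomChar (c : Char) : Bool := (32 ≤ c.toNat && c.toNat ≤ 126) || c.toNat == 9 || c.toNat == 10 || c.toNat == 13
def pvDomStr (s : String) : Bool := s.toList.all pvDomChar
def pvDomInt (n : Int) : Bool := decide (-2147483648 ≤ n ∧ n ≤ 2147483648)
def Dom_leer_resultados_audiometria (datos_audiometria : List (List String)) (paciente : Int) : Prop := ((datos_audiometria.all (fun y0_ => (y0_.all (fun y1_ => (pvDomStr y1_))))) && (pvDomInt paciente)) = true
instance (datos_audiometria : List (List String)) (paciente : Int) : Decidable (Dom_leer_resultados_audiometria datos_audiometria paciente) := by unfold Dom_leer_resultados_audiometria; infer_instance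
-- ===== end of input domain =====

-- B separates A's interleaved append-and-classify loop into a filter pass per ear
-- followed by a shared classification pass (objective: simpler decomposition, same cost).

-- ===== PORT A =====
-- loop body of A's single for-loop, on the 4-tuple state (oi, od, ni, nd)
def pvStepA (paciente : Int) (st : List String × List String × List String × List String)
    (fila : List String) : List String × List String × List String × List String :=
  let st1 :=
    if PySem.List.pyGetD fila 2 "" = "I" ∧
        (PySem.Int.ofStr? (PySem.List.pyGetD fila 0 "")).getD 0 = paciente then
      let nivel := (PySem.Int.ofStr? (PySem.List.pyGetD fila 3 "")).getD 0
      (st.1 ++ [PySem.List.pyGetD fila 3 ""], st.2.1,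
        (if 0 < nivel ∧ nivel ≤ 25 then st.2.2.1 ++ ["N"]
         else if 25 < nivel ∧ nivel ≤ 40 then st.2.2.1 ++ ["DL"]
         else if 40 < nivel ∧ nivel ≤ 55 then st.2.2.1 ++ ["DM"]
         else if 55 < nivel ∧ nivel ≤ 70 then st.2.2.1 ++ ["DS"]
         else st.2.2.1), st.2.2.2)
    else st
  if PySem.List.pyGetD fila 2 "" = "D" ∧
      (PySem.Int.ofStr? (PySem.List.pyGetD fila 0 "")).getD 0 = paciente then
    let nivel := (PySem.Int.ofStr? (PySem.List.pyGetD fila 3 "")).getD 0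
    (st1.1, st1.2.1 ++ [PySem.List.pyGetD fila 3 ""],
      st1.2.2.1,
      (if 0 < nivel ∧ nivel ≤ 25 then st1.2.2.2 ++ ["N"]
       else if 25 < nivel ∧ nivel ≤ 40 then st1.2.2.2 ++ ["DL"]
       else if 40 < nivel ∧ nivel ≤ 55 then st1.2.2.2 ++ ["DM"]
       else if 55 < nivel ∧ nivel ≤ 70 then st1.2.2.2 ++ ["DS"]
       else st1.2.2.2))
  else st1

def leer_resultados_audiometria (datos_audiometria : List (List String)) (paciente : Int) :
    List String × List String × List String × List String :=
  let n : Int := datos_audiometria.length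
  (PySem.List.pyRange 1 n 1).foldl
    (fun st i => pvStepA paciente st (PySem.List.pyGetD datos_audiometria i []))
    ([], [], [], [])

-- ===== PORT B =====
-- B's helper 'clasificar': second pass over one ear's collected values
def pvClasificar (valores : List String) : List String :=
  valores.foldl (fun niveles v =>
    let n := (PySem.Int.ofStr? v).getD 0
    if 0 < n ∧ n ≤ 70 then
      niveles ++ [if n ≤ 25 then "N" else if n ≤ 40 then "DL" else if n ≤ 55 then "DM" else "DS"]
    else niveles) []

def leer_resultados_audiometria_alt (datos_audiometria : List (List String)) (paciente : Int) :
    List String × List String × List String × List String :=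
  let pares := (PySem.List.slice datos_audiometria (some 1) none).foldl
    (fun (st : List String × List String) fila =>
      let oreja := PySem.List.pyGetD fila 2 ""
      if (oreja = "I" ∨ oreja = "D") ∧
          (PySem.Int.ofStr? (PySem.List.pyGetD fila 0 "")).getD 0 = paciente then
        let v := PySem.List.pyGetD fila 3 ""
        if oreja = "I" then (st.1 ++ [v], st.2) else (st.1, st.2 ++ [v])
      else st) ([], [])
  (pares.1, pares.2, pvClasificar pares.1, pvClasificar pares.2)

-- ===== PRECONDITION & SPEC =====
-- Pre_ excludes exactly the inputs on which Python A raises: a data row (after the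
-- header) shorter than 3 (IndexError at fila[2]); an "I"/"D" row whose patient field
-- does not parse as int (ValueError); a matching row without a parsable 4th field
-- (IndexError/ValueError at fila[3]).
def Pre_leer_resultados_audiometria (datos_audiometria : List (List String)) (paciente : Int) : Prop :=
  ∀ fila ∈ datos_audiometria.drop 1,
    3 ≤ fila.length ∧
    ((fila.getD 2 "" = "I" ∨ fila.getD 2 "" = "D") →
      (PySem.Int.ofStr? (fila.getD 0 "")).isSome ∧
      ((PySem.Int.ofStr? (fila.getD 0 "")).getD 0 = paciente →
        4 ≤ fila.length ∧ (PySem.Int.ofStr? (fila.getD 3 "")).isSome))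

instance (datos_audiometria : List (List String)) (paciente : Int) : Decidable (Pre_leer_resultados_audiometria datos_audiometria paciente) := by unfold Pre_leer_resultados_audiometria; infer_instance

def pvWitness_leer_resultados_audiometria : List (List String) × Int :=
  ([["id", "nombre", "oido", "valor"], ["1", "ana", "I", "30"], ["1", "ana", "D", "80"], ["2", "eva", "I", "10"]], 1)

def Spec_leer_resultados_audiometria (datos_audiometria : List (List String)) (paciente : Int) (out : List String × List String × List String × List String) : Prop := out = leer_resultados_audiometria_alt datos_audiometria paciente
instance (datos_audiometria : List (List String)) (paciente : Int) (out : List String × List String × List String × List String) : Decidable (Spec_leer_resultados_audiometria datos_audiometria paciente out) := by unfold Spec_leer_resultados_audiometria; infer_instance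

-- ===== CLAIM (what is proved, stated in full; the proofs are below) =====
def Claim_equal_leer_resultados_audiometria : Prop := ∀ (datos_audiometria : List (List String)) (paciente : Int), Dom_leer_resultados_audiometria datos_audiometria paciente → Pre_leer_resultados_audiometria datos_audiometria paciente → Spec_leer_resultados_audiometria datos_audiometria paciente (leer_resultados_audiometria datos_audiometria paciente)

-- ===== LEMMAS AND PROOFS =====

-- specification helpers (proof-only)
def pvMatch (paciente : Int) (e : String) (fila : List String) : Bool :=
  decide (PySem.List.pyGetD fila 2 "" = e ∧
    (PySem.Int.ofStr? (PySem.List.pyGetD fila 0 "")).getD 0 = paciente)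

def pvCol (paciente : Int) (e : String) (l : List (List String)) : List String :=
  (l.filter (pvMatch paciente e)).map (fun fila => PySem.List.pyGetD fila 3 "")

def pvPred (v : String) : Bool :=
  decide (0 < (PySem.Int.ofStr? v).getD 0 ∧ (PySem.Int.ofStr? v).getD 0 ≤ 70)

def pvLbl (v : String) : String :=
  let n := (PySem.Int.ofStr? v).getD 0
  if n ≤ 25 then "N" else if n ≤ 40 then "DL" else if n ≤ 55 then "DM" else "DS"

def pvCls (l : List String) : List String := (l.filter pvPred).map pvLbl

theorem pvClasificar_eq_cls (l : List String) : pvClasificar l = pvCls l := by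
  unfold pvClasificar pvCls
  have hstep : (fun (niveles : List String) v =>
      let n := (PySem.Int.ofStr? v).getD 0
      if 0 < n ∧ n ≤ 70 then
        niveles ++ [if n ≤ 25 then "N" else if n ≤ 40 then "DL" else if n ≤ 55 then "DM" else "DS"]
      else niveles)
      = fun (acc : List String) v => if pvPred v then acc ++ [pvLbl v] else acc := by
    funext acc v
    simp [pvPred, pvLbl]
  rw [hstep, PySem.List.foldl_append_if pvPred pvLbl]
  simp

theorem pvCls_append (a b : List String) : pvCls (a ++ b) = pvCls a ++ pvCls b := by
  simp [pvCls]

theorem pvCls_cons (x : String) (l : List String) : pvCls (x :: l) = pvCls [x] ++ pvCls l := by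
  rw [show x :: l = [x] ++ l from rfl, pvCls_append]

theorem chain_int (ni : List String) (n : Int) :
    (if 0 < n ∧ n ≤ 25 then ni ++ ["N"]
     else if 25 < n ∧ n ≤ 40 then ni ++ ["DL"]
     else if 40 < n ∧ n ≤ 55 then ni ++ ["DM"]
     else if 55 < n ∧ n ≤ 70 then ni ++ ["DS"]
     else ni) = ni ++ (if 0 < n ∧ n ≤ 70 then
       [if n ≤ 25 then "N" else if n ≤ 40 then "DL" else if n ≤ 55 then "DM" else "DS"] else []) := by
  split_ifs <;> first | rfl | omega | simp

-- A's if-elif chain on one value equals appending pvCls of the singleton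
theorem pvChain_eq (ni : List String) (v : String) :
    (if 0 < (PySem.Int.ofStr? v).getD 0 ∧ (PySem.Int.ofStr? v).getD 0 ≤ 25 then ni ++ ["N"]
     else if 25 < (PySem.Int.ofStr? v).getD 0 ∧ (PySem.Int.ofStr? v).getD 0 ≤ 40 then ni ++ ["DL"]
     else if 40 < (PySem.Int.ofStr? v).getD 0 ∧ (PySem.Int.ofStr? v).getD 0 ≤ 55 then ni ++ ["DM"]
     else if 55 < (PySem.Int.ofStr? v).getD 0 ∧ (PySem.Int.ofStr? v).getD 0 ≤ 70 then ni ++ ["DS"]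
     else ni) = ni ++ pvCls [v] := by
  rw [chain_int ni ((PySem.Int.ofStr? v).getD 0)]
  congr 1
  simp only [pvCls, pvPred, List.filter_cons, List.filter_nil, decide_eq_true_eq]
  split_ifs <;> simp_all [pvLbl] <;> split_ifs <;> first | rfl | omega

-- invariant of A's loop
theorem lemA (p : Int) (l : List (List String)) :
    ∀ oi od ni nd, l.foldl (pvStepA p) (oi, od, ni, nd) =
      (oi ++ pvCol p "I" l, od ++ pvCol p "D" l,
       ni ++ pvCls (pvCol p "I" l), nd ++ pvCls (pvCol p "D" l)) := by
  induction l with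
  | nil => intro oi od ni nd; simp [pvCol, pvCls]
  | cons f t ih =>
      intro oi od ni nd
      have hcolI : pvCol p "I" (f :: t) =
          (if pvMatch p "I" f then [PySem.List.pyGetD f 3 ""] else []) ++ pvCol p "I" t := by
        simp only [pvCol, List.filter]; split_ifs with h <;> simp [h]
      have hcolD : pvCol p "D" (f :: t) =
          (if pvMatch p "D" f then [PySem.List.pyGetD f 3 ""] else []) ++ pvCol p "D" t := by
        simp only [pvCol, List.filter]; split_ifs with h <;> simp [h]
      by_cases hI : PySem.List.pyGetD f 2 "" = "I" ∧
          (PySem.Int.ofStr? (PySem.List.pyGetD f 0 "")).getD 0 = p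
      · have hmI : pvMatch p "I" f = true := by simp [pvMatch, hI.1, hI.2]
        have hmD : pvMatch p "D" f = false := by
          simp only [pvMatch, decide_eq_false_iff_not]
          rintro ⟨h2, -⟩; rw [hI.1] at h2; exact absurd h2 (by decide)
        have hND : ¬ (PySem.List.pyGetD f 2 "" = "D" ∧
            (PySem.Int.ofStr? (PySem.List.pyGetD f 0 "")).getD 0 = p) := by
          rintro ⟨h2, -⟩; rw [hI.1] at h2; exact absurd h2 (by decide)
        simp only [List.foldl_cons]
        rw [show pvStepA p (oi, od, ni, nd) f =
            (oi ++ [PySem.List.pyGetD f 3 ""], od, ni ++ pvCls [PySem.List.pyGetD f 3 ""], nd) by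
          simp only [pvStepA, if_pos hI, if_neg hND]
          rw [← pvChain_eq ni (PySem.List.pyGetD f 3 "")]]
        rw [ih, hcolI, hcolD, hmI, hmD]
        simp [pvCls_cons (PySem.List.pyGetD f 3 "") (pvCol p "I" t)]
      · by_cases hD : PySem.List.pyGetD f 2 "" = "D" ∧
            (PySem.Int.ofStr? (PySem.List.pyGetD f 0 "")).getD 0 = p
        · have hmD : pvMatch p "D" f = true := by simp [pvMatch, hD.1, hD.2]
          have hmI : pvMatch p "I" f = false := by
            simp only [pvMatch, decide_eq_false_iff_not]; exact hI
          simp only [List.foldl_cons]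
          rw [show pvStepA p (oi, od, ni, nd) f =
              (oi, od ++ [PySem.List.pyGetD f 3 ""], ni, nd ++ pvCls [PySem.List.pyGetD f 3 ""]) by
            simp only [pvStepA, if_neg hI, if_pos hD]
            rw [← pvChain_eq nd (PySem.List.pyGetD f 3 "")]]
          rw [ih, hcolI, hcolD, hmI, hmD]
          simp [pvCls_cons (PySem.List.pyGetD f 3 "") (pvCol p "D" t)]
        · have hmI : pvMatch p "I" f = false := by
            simp only [pvMatch, decide_eq_false_iff_not]; exact hI
          have hmD : pvMatch p "D" f = false := by
            simp only [pvMatch, decide_eq_false_iff_not]; exact hD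
          simp only [List.foldl_cons]
          rw [show pvStepA p (oi, od, ni, nd) f = (oi, od, ni, nd) by
            simp only [pvStepA, if_neg hI, if_neg hD]]
          rw [ih, hcolI, hcolD, hmI, hmD]
          simp

-- invariant of B's filter loop
theorem lemB (p : Int) (l : List (List String)) :
    ∀ (a b : List String), l.foldl
      (fun (st : List String × List String) fila =>
        let oreja := PySem.List.pyGetD fila 2 ""
        if (oreja = "I" ∨ oreja = "D") ∧
            (PySem.Int.ofStr? (PySem.List.pyGetD fila 0 "")).getD 0 = p then
          let v := PySem.List.pyGetD fila 3 ""
          if oreja = "I" then (st.1 ++ [v], st.2) else (st.1, st.2 ++ [v])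
        else st) (a, b) = (a ++ pvCol p "I" l, b ++ pvCol p "D" l) := by
  induction l with
  | nil => intro a b; simp [pvCol]
  | cons f t ih =>
      intro a b
      have hcolI : pvCol p "I" (f :: t) =
          (if pvMatch p "I" f then [PySem.List.pyGetD f 3 ""] else []) ++ pvCol p "I" t := by
        simp only [pvCol, List.filter]; split_ifs with h <;> simp [h]
      have hcolD : pvCol p "D" (f :: t) =
          (if pvMatch p "D" f then [PySem.List.pyGetD f 3 ""] else []) ++ pvCol p "D" t := by
        simp only [pvCol, List.filter]; split_ifs with h <;> simp [h]
      simp only [List.foldl_cons]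
      by_cases hI : PySem.List.pyGetD f 2 "" = "I" ∧
          (PySem.Int.ofStr? (PySem.List.pyGetD f 0 "")).getD 0 = p
      · have hmI : pvMatch p "I" f = true := by simp [pvMatch, hI.1, hI.2]
        have hmD : pvMatch p "D" f = false := by
          simp only [pvMatch, decide_eq_false_iff_not]
          rintro ⟨h2, -⟩; rw [hI.1] at h2; exact absurd h2 (by decide)
        rw [show (let oreja := PySem.List.pyGetD f 2 ""
            if (oreja = "I" ∨ oreja = "D") ∧
                (PySem.Int.ofStr? (PySem.List.pyGetD f 0 "")).getD 0 = p then
              let v := PySem.List.pyGetD f 3 ""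
              if oreja = "I" then ((a, b).1 ++ [v], (a, b).2) else ((a, b).1, (a, b).2 ++ [v])
            else (a, b)) = (a ++ [PySem.List.pyGetD f 3 ""], b) by
          simp only []
          rw [if_pos ⟨Or.inl hI.1, hI.2⟩, if_pos hI.1]]
        rw [ih, hcolI, hcolD, hmI, hmD]; simp
      · by_cases hD : PySem.List.pyGetD f 2 "" = "D" ∧
            (PySem.Int.ofStr? (PySem.List.pyGetD f 0 "")).getD 0 = p
        · have hmD : pvMatch p "D" f = true := by simp [pvMatch, hD.1, hD.2]
          have hmI : pvMatch p "I" f = false := by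
            simp only [pvMatch, decide_eq_false_iff_not]; exact hI
          have hfI : ¬ PySem.List.pyGetD f 2 "" = "I" := by
            intro h; exact hI ⟨h, hD.2⟩
          rw [show (let oreja := PySem.List.pyGetD f 2 ""
              if (oreja = "I" ∨ oreja = "D") ∧
                  (PySem.Int.ofStr? (PySem.List.pyGetD f 0 "")).getD 0 = p then
                let v := PySem.List.pyGetD f 3 ""
                if oreja = "I" then ((a, b).1 ++ [v], (a, b).2) else ((a, b).1, (a, b).2 ++ [v])
              else (a, b)) = (a, b ++ [PySem.List.pyGetD f 3 ""]) by
            simp only []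
            rw [if_pos ⟨Or.inr hD.1, hD.2⟩, if_neg hfI]]
          rw [ih, hcolI, hcolD, hmI, hmD]; simp
        · have hmI : pvMatch p "I" f = false := by
            simp only [pvMatch, decide_eq_false_iff_not]; exact hI
          have hmD : pvMatch p "D" f = false := by
            simp only [pvMatch, decide_eq_false_iff_not]; exact hD
          have hc : ¬ ((PySem.List.pyGetD f 2 "" = "I" ∨ PySem.List.pyGetD f 2 "" = "D") ∧
              (PySem.Int.ofStr? (PySem.List.pyGetD f 0 "")).getD 0 = p) := by
            rintro ⟨h2 | h2, hp⟩
            · exact hI ⟨h2, hp⟩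
            · exact hD ⟨h2, hp⟩
          rw [show (let oreja := PySem.List.pyGetD f 2 ""
              if (oreja = "I" ∨ oreja = "D") ∧
                  (PySem.Int.ofStr? (PySem.List.pyGetD f 0 "")).getD 0 = p then
                let v := PySem.List.pyGetD f 3 ""
                if oreja = "I" then ((a, b).1 ++ [v], (a, b).2) else ((a, b).1, (a, b).2 ++ [v])
              else (a, b)) = (a, b) by
            simp only []; rw [if_neg hc]]
          rw [ih, hcolI, hcolD, hmI, hmD]; simp

theorem ports_eq (datos : List (List String)) (p : Int) :
    leer_resultados_audiometria datos p = leer_resultados_audiometria_alt datos p := by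
  unfold leer_resultados_audiometria leer_resultados_audiometria_alt
  simp only []
  rw [PySem.List.foldl_pyRange_pyGetD' datos [] (pvStepA p) ([], [], [], []) (a := 1) (by norm_num),
    PySem.List.slice_from_one, ← List.drop_one]
  simp only [Int.toNat_one]
  rw [lemA p (datos.drop 1) [] [] [] [], lemB p (datos.drop 1) [] []]
  simp [pvClasificar_eq_cls]

-- ===== VERDICT (by name: the statement is the Claim_ definition above) =====
theorem leer_resultados_audiometria_spec : Claim_equal_leer_resultados_audiometria := by
  intro datos p _dom _pre
  unfold Spec_leer_resultados_audiometria
  exact ports_eq datos p
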